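-- pv_equiv track=rewrite | github.com/duenti/SDB | sdb/util.py | seq2alignPosition
-- ===== SOURCE A (Python) =====
-- def seq2alignPosition(sequence, pos, offset):
--     pos -= (offset - 1)
--     seqpos = 0
--     amspos = 1
--     found = False
--     for i, aa in enumerate(sequence):
--         if aa != '-' and aa != '.':
--             seqpos += 1
--             if seqpos == pos:
--                 found = True
--                 amspos = i + 1
--     if found:
--         return amspos
--     else:
--         return -1
-- ===== SOURCE B (Python) =====
-- def seq2alignPosition(sequence, pos, offset):
--     target = pos - (offset - 1)
--     # staged pass 1: prefix counts of non-gap characters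
--     prefix = [0]
--     c = 0
--     for aa in sequence:
--         if aa != '-' and aa != '.':
--             c += 1
--         prefix.append(c)
--     if target < 1 or c < target:
--         return -1
--     # binary search: least column col with prefix[col] >= target
--     lo, hi = 1, len(sequence)
--     while lo < hi:
--         mid = (lo + hi) // 2
--         if prefix[mid] < target:
--             lo = mid + 1
--         else:
--             hi = mid
--     return lo
-- ===== Notes on version B (the rewrite author's own statement) =====
-- stated objective: alternative
-- what changed: Replaces A's single counting scan (running counter + found/sentinel state) with two stages: a prefix-count table of non-gap characters followed by a binary search for the least column whose prefix count reaches the target.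
import Mathlib
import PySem

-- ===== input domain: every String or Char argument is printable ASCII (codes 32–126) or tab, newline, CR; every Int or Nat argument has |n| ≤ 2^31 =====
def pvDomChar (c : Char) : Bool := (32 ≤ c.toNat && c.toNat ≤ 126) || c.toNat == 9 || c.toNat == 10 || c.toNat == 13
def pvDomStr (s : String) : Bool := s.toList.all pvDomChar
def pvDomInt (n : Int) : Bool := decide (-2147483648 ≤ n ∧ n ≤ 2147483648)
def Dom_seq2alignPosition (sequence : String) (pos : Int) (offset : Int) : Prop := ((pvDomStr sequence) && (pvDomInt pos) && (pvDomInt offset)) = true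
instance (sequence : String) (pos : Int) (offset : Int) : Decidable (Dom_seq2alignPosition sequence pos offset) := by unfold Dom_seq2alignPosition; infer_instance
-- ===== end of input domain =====

-- B replaces A's one-pass running-counter/sentinel scan with a prefix-count table
-- plus a binary search for the least column reaching the target (objective: alternative).


-- ===== PORT A =====
-- one step of A's loop body: state (seqpos, amspos, found), element (i, aa)
def pvStepA (pos : Int) (st : Int × Int × Bool) (p : Int × Char) : Int × Int × Bool :=
  if p.2 ≠ '-' ∧ p.2 ≠ '.' then
    let seqpos := st.1 + 1
    if seqpos = pos then (seqpos, p.1 + 1, true) else (seqpos, st.2.1, st.2.2)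
  else st

def seq2alignPosition (sequence : String) (pos : Int) (offset : Int) : Int :=
  let pos := pos - (offset - 1)
  let st := (PySem.List.enumerate sequence.toList).foldl (pvStepA pos) (0, 1, false)
  if st.2.2 then st.2.1 else -1

-- ===== PORT B =====
-- B's first pass: state (prefix list, running count c); appends the updated count
def pvStepB (st : List Int × Int) (aa : Char) : List Int × Int :=
  let c := if aa ≠ '-' ∧ aa ≠ '.' then st.2 + 1 else st.2
  (st.1 ++ [c], c)

-- B's `while lo < hi` binary search; prefix[mid] is always in range here
-- (1 ≤ lo ≤ mid < hi ≤ len(prefix)-1 at every call from _alt), so getD is exact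
def pvBSearch (pre : List Int) (target : Int) (lo hi : Int) : Int :=
  if lo < hi then
    let mid := PySem.Int.floordiv (lo + hi) 2
    if pre.getD mid.toNat 0 < target then pvBSearch pre target (mid + 1) hi
    else pvBSearch pre target lo mid
  else lo
termination_by (hi - lo).toNat
decreasing_by
  · have h := PySem.Int.floordiv_two_mid_bounds (lo := lo) (hi := hi) (by omega)
    have h2 : PySem.Int.floordiv (lo + hi) 2 = (lo + hi) / 2 :=
      PySem.Int.floordiv_eq_ediv_of_pos (by omega)
    rw [h2] at h ⊢; omega
  · have h := PySem.Int.floordiv_two_mid_bounds (lo := lo) (hi := hi) (by omega)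
    have h2 : PySem.Int.floordiv (lo + hi) 2 = (lo + hi) / 2 :=
      PySem.Int.floordiv_eq_ediv_of_pos (by omega)
    have h3 : (lo + hi) / 2 < hi := by omega
    rw [h2] at h ⊢; omega

def seq2alignPosition_alt (sequence : String) (pos : Int) (offset : Int) : Int :=
  let target := pos - (offset - 1)
  let st := sequence.toList.foldl pvStepB ([0], 0)
  if target < 1 ∨ st.2 < target then -1
  else pvBSearch st.1 target 1 (sequence.toList.length : Int)

-- ===== PRECONDITION & SPEC =====
def Spec_seq2alignPosition (sequence : String) (pos : Int) (offset : Int) (out : Int) : Prop := out = seq2alignPosition_alt sequence pos offset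
instance (sequence : String) (pos : Int) (offset : Int) (out : Int) : Decidable (Spec_seq2alignPosition sequence pos offset out) := by unfold Spec_seq2alignPosition; infer_instance

-- ===== CLAIM (what is proved, stated in full; the proofs are below) =====
def Claim_equal_seq2alignPosition : Prop := ∀ (sequence : String) (pos : Int) (offset : Int), Dom_seq2alignPosition sequence pos offset → Spec_seq2alignPosition sequence pos offset (seq2alignPosition sequence pos offset)

-- ===== LEMMAS AND PROOFS =====

-- non-gap indicator and count, proof-side abbreviations
def pvInd (a : Char) : Bool := decide (a ≠ '-' ∧ a ≠ '.')
def pvCnt (l : List Char) : Nat := l.countP pvInd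

-- the 1-based columns of the non-gap characters, enumerate starting at s
def pvPositions (l : List Char) (s : Int) : List Int :=
  (PySem.List.enumerate l s).filterMap
    (fun p => if p.2 ≠ '-' ∧ p.2 ≠ '.' then some (p.1 + 1) else none)

-- spec-side prefix-count tail: pvPfx l c = [c + cnt(take 1 l), …, c + cnt l]
def pvPfx (l : List Char) (c : Int) : List Int :=
  match l with
  | [] => []
  | a :: tl => let c' := if pvInd a then c + 1 else c; c' :: pvPfx tl c'

-- B's fold = append the spec prefix tail, final count = c + cnt l
theorem pvFoldB (l : List Char) : ∀ (acc : List Int) (c : Int),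
    l.foldl pvStepB (acc, c) = (acc ++ pvPfx l c, c + (pvCnt l : Int)) := by
  induction l with
  | nil => intro acc c; simp [pvPfx, pvCnt]
  | cons a tl ih =>
    intro acc c
    by_cases h : a ≠ '-' ∧ a ≠ '.'
    · have hi : pvInd a = true := by simp [pvInd, h.1, h.2]
      rw [List.foldl_cons]
      simp only [pvStepB, if_pos h]
      rw [ih]
      simp only [pvPfx, hi, if_true, Prod.mk.injEq]
      refine ⟨by simp, by simp [pvCnt, List.countP_cons, hi]; ring⟩
    · have hi : pvInd a = false := by
        simp only [pvInd, decide_eq_false_iff_not]; exact h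
      rw [List.foldl_cons]
      simp only [pvStepB, if_neg h]
      rw [ih]
      simp only [pvPfx, hi, Bool.false_eq_true, if_false, Prod.mk.injEq]
      refine ⟨by simp, by simp [pvCnt, List.countP_cons, hi]⟩

-- entries of the full prefix table: ([0] ++ pvPfx l 0)[k] = cnt (take k l)  for k ≤ len l
theorem pvPfx_getD (l : List Char) : ∀ (c : Int) (k : Nat), k < l.length →
    (pvPfx l c).getD k 0 = c + (pvCnt (l.take (k + 1)) : Int) := by
  induction l with
  | nil => intro c k hk; simp at hk
  | cons a tl ih =>
    intro c k hk
    cases k with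
    | zero =>
      cases h : pvInd a <;>
        simp [pvPfx, h, pvCnt, List.countP_cons]
    | succ k' =>
      have hk' : k' < tl.length := by simpa using hk
      have hstep : pvPfx (a :: tl) c
          = (if pvInd a then c + 1 else c) :: pvPfx tl (if pvInd a then c + 1 else c) := rfl
      by_cases h : pvInd a = true
      · rw [hstep]
        simp only [h, if_true, List.getD_cons_succ, ih _ k' hk']
        simp [pvCnt, List.take_succ_cons, List.countP_cons, h]
        push_cast; ring
      · have hf : pvInd a = false := by simpa using h
        rw [hstep]
        simp only [hf, Bool.false_eq_true, if_false, List.getD_cons_succ, ih _ k' hk']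
        simp [pvCnt, List.take_succ_cons, List.countP_cons, hf]

theorem pvTable_getD (l : List Char) (k : Nat) (hk : k ≤ l.length) :
    (([0] ++ pvPfx l 0 : List Int)).getD k 0 = (pvCnt (l.take k) : Int) := by
  cases k with
  | zero => simp [pvCnt]
  | succ k' =>
    have hk' : k' < l.length := by omega
    simp only [List.getD, List.getElem?_append_right (by simp : ([0] : List Int).length ≤ k' + 1)]
    have : k' + 1 - ([0] : List Int).length = k' := by simp
    rw [this]
    have := pvPfx_getD l 0 k' hk'
    simp only [List.getD] at this
    rw [this]; ring

-- cnt of a take is monotone in the amount taken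
theorem pvCnt_take_mono (l : List Char) {i j : Nat} (h : i ≤ j) :
    pvCnt (l.take i) ≤ pvCnt (l.take j) := by
  have : l.take i = (l.take j).take i := by rw [List.take_take, Nat.min_eq_left h]
  rw [this]
  have hs : ((l.take j).take i).Sublist (l.take j) := List.take_sublist _ _
  exact hs.countP_le

theorem pvPositions_length (l : List Char) : ∀ s, (pvPositions l s).length = pvCnt l := by
  induction l with
  | nil => intro s; simp [pvPositions, pvCnt, PySem.List.enumerate_nil]
  | cons a tl ih =>
    intro s
    by_cases h : a ≠ '-' ∧ a ≠ '.'
    · have hi : pvInd a = true := by simp [pvInd, h.1, h.2]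
      have hpos : pvPositions (a :: tl) s = (s + 1) :: pvPositions tl (s + 1) := by
        simp [pvPositions, PySem.List.enumerate_cons, List.filterMap_cons, h]
      rw [hpos]
      simp [pvCnt, List.countP_cons, hi, ih (s + 1)]
    · have hi : pvInd a = false := by
        simp only [pvInd, decide_eq_false_iff_not]; exact h
      have hpos : pvPositions (a :: tl) s = pvPositions tl (s + 1) := by
        simp [pvPositions, PySem.List.enumerate_cons, List.filterMap_cons, h]
      rw [hpos]
      simp [pvCnt, List.countP_cons, hi, ih (s + 1)]

-- the t-th position (1-based) is the unique column c with cnt(take c) = t, cnt(take (c-1)) = t-1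
theorem pvPositions_key (l : List Char) : ∀ (s t : Int), 1 ≤ t → t ≤ (pvCnt l : Int) →
    ∃ c : Nat, (pvPositions l s).getD (t - 1).toNat 0 = s + (c : Int) ∧ 1 ≤ c ∧ c ≤ l.length ∧
      (pvCnt (l.take c) : Int) = t ∧ (pvCnt (l.take (c - 1)) : Int) = t - 1 := by
  induction l with
  | nil => intro s t h1 h2; simp [pvCnt] at h2; omega
  | cons a tl ih =>
    intro s t h1 h2
    by_cases h : a ≠ '-' ∧ a ≠ '.'
    · have hi : pvInd a = true := by simp [pvInd, h.1, h.2]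
      have hpos : pvPositions (a :: tl) s = (s + 1) :: pvPositions tl (s + 1) := by
        simp [pvPositions, PySem.List.enumerate_cons, List.filterMap_cons, h]
      by_cases ht : t = 1
      · refine ⟨1, ?_, by omega, by simp, ?_, ?_⟩
        · subst ht; simp [hpos]
        · simp [pvCnt, List.countP_cons, hi, ht]
        · simp [pvCnt, ht]
      · have hcnt : (pvCnt (a :: tl) : Int) = (pvCnt tl : Int) + 1 := by
          simp [pvCnt, List.countP_cons, hi]
        obtain ⟨c', hv, hc1, hc2, hc3, hc4⟩ := ih (s + 1) (t - 1) (by omega) (by omega)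
        refine ⟨c' + 1, ?_, by omega, by simpa using hc2, ?_, ?_⟩
        · rw [hpos]
          have hidx : (t - 1).toNat = (t - 1 - 1).toNat + 1 := by omega
          rw [hidx]
          simp only [List.getD, List.getElem?_cons_succ]
          simp only [List.getD] at hv
          rw [hv]; push_cast; ring
        · simp only [List.take_succ_cons, pvCnt, List.countP_cons, hi]
          simp only [pvCnt] at hc3; push_cast; omega
        · have h5 : c' + 1 - 1 = c' := by omega
          rw [h5]
          obtain ⟨k, rfl⟩ : ∃ k, c' = k + 1 := ⟨c' - 1, by omega⟩
          have h6 : (a :: tl).take (k + 1) = a :: tl.take k := by simp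
          rw [h6]
          simp only [Nat.add_sub_cancel, pvCnt] at hc4
          simp only [pvCnt, List.countP_cons, hi]
          push_cast; omega
    · have hi : pvInd a = false := by
        simp only [pvInd, decide_eq_false_iff_not]; exact h
      have hpos : pvPositions (a :: tl) s = pvPositions tl (s + 1) := by
        simp [pvPositions, PySem.List.enumerate_cons, List.filterMap_cons, h]
      have hcnt : pvCnt (a :: tl) = pvCnt tl := by simp [pvCnt, List.countP_cons, hi]
      obtain ⟨c', hv, hc1, hc2, hc3, hc4⟩ := ih (s + 1) t h1 (by rw [hcnt] at h2; exact h2)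
      refine ⟨c' + 1, ?_, by omega, by simpa using hc2, ?_, ?_⟩
      · rw [hpos, hv]; push_cast; ring
      · simp only [List.take_succ_cons, pvCnt, List.countP_cons, hi]
        simp only [pvCnt] at hc3; push_cast; omega
      · have h5 : c' + 1 - 1 = c' := by omega
        rw [h5]
        obtain ⟨k, rfl⟩ : ∃ k, c' = k + 1 := ⟨c' - 1, by omega⟩
        have h6 : (a :: tl).take (k + 1) = a :: tl.take k := by simp
        rw [h6]
        simp only [Nat.add_sub_cancel, pvCnt] at hc4
        simp only [pvCnt, List.countP_cons, hi]
        push_cast; omega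

-- binary-search invariant: result r has lo0 ≤ r ≤ hi0, P[r] ≥ t, and P[k] < t for all k < r,
-- over the table P = [0] ++ pvPfx l 0 (so P[k] = cnt (take k l))
theorem pvBSearch_spec (l : List Char) (t : Int) :
    ∀ (fuel : Nat) (lo hi : Int), (hi - lo).toNat ≤ fuel → 1 ≤ lo → lo ≤ hi → hi ≤ (l.length : Int) →
    t ≤ (pvCnt (l.take hi.toNat) : Int) →
    (∀ k : Nat, (k : Int) < lo → (pvCnt (l.take k) : Int) < t) →
    ∃ r : Int, pvBSearch ([0] ++ pvPfx l 0) t lo hi = r ∧ lo ≤ r ∧ r ≤ hi ∧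
      t ≤ (pvCnt (l.take r.toNat) : Int) ∧ (∀ k : Nat, (k : Int) < r → (pvCnt (l.take k) : Int) < t) := by
  intro fuel
  induction fuel with
  | zero =>
    intro lo hi hf h1 h2 h3 h4 h5
    have : lo = hi := by omega
    subst this
    refine ⟨lo, ?_, le_refl _, le_refl _, h4, h5⟩
    rw [pvBSearch]; simp
  | succ n ihf =>
    intro lo hi hf h1 h2 h3 h4 h5
    by_cases hlt : lo < hi
    · have hmid := PySem.Int.floordiv_two_mid_bounds (lo := lo) (hi := hi) (by omega)
      have heq : PySem.Int.floordiv (lo + hi) 2 = (lo + hi) / 2 :=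
        PySem.Int.floordiv_eq_ediv_of_pos (by omega)
      have hmlo : lo ≤ PySem.Int.floordiv (lo + hi) 2 := hmid.1
      have hmhi : PySem.Int.floordiv (lo + hi) 2 < hi := by rw [heq]; omega
      have hmn : (PySem.Int.floordiv (lo + hi) 2).toNat ≤ l.length := by omega
      have htab := pvTable_getD l (PySem.Int.floordiv (lo + hi) 2).toNat hmn
      have hunf : pvBSearch ([0] ++ pvPfx l 0) t lo hi =
          (if ([0] ++ pvPfx l 0).getD (PySem.Int.floordiv (lo + hi) 2).toNat 0 < t
           then pvBSearch ([0] ++ pvPfx l 0) t (PySem.Int.floordiv (lo + hi) 2 + 1) hi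
           else pvBSearch ([0] ++ pvPfx l 0) t lo (PySem.Int.floordiv (lo + hi) 2)) := by
        rw [pvBSearch, if_pos hlt]
      rw [hunf, htab]
      set mid := PySem.Int.floordiv (lo + hi) 2 with hmiddef
      by_cases hbr : (pvCnt (l.take mid.toNat) : Int) < t
      · rw [if_pos hbr]
        refine (ihf (mid + 1) hi (by omega) (by omega) (by omega) h3 h4 ?_).imp ?_
        · intro k hk
          have hkm : k ≤ mid.toNat := by omega
          have := pvCnt_take_mono l hkm
          omega
        · intro r ⟨ha, hb, hc, hd, he⟩
          exact ⟨ha, by omega, hc, hd, he⟩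
      · rw [if_neg hbr]
        refine (ihf lo mid (by omega) h1 (by omega) (by omega) (by omega) h5).imp ?_
        intro r ⟨ha, hb, hc, hd, he⟩
        exact ⟨ha, hb, by omega, hd, he⟩
    · have : lo = hi := by omega
      subst this
      refine ⟨lo, ?_, le_refl _, le_refl _, h4, h5⟩
      rw [pvBSearch]; simp

-- invariant for A's fold in terms of B's positions list (carried over from the lookup view)
theorem pvFoldA_char (l : List (Int × Char)) (pos : Int) :
    ∀ (s a : Int) (f : Bool),
      l.foldl (pvStepA pos) (s, a, f) =
        (let ps := l.filterMap (fun p => if p.2 ≠ '-' ∧ p.2 ≠ '.' then some (p.1 + 1) else none)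
         if s < pos ∧ pos ≤ s + (ps.length : Int) then (s + (ps.length : Int), ps.getD (pos - s - 1).toNat 0, true)
         else (s + (ps.length : Int), a, f)) := by
  induction l with
  | nil =>
    intro s a f
    simp only [List.foldl_nil, List.filterMap_nil, List.length_nil]
    have h0 : ¬ (s < pos ∧ pos ≤ s + ((0 : Nat) : Int)) := by push_cast; omega
    simp only [Nat.cast_zero] at h0 ⊢
    rw [if_neg h0]
    simp
  | cons hd tl ih =>
    intro s a f
    by_cases hg : hd.2 ≠ '-' ∧ hd.2 ≠ '.'
    · by_cases hp : s + 1 = pos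
      · have h1 : pvStepA pos (s, a, f) hd = (s + 1, hd.1 + 1, true) := by
          simp [pvStepA, hg, hp]
        rw [List.foldl_cons, h1, ih]
        simp only [List.filterMap_cons, if_pos hg]
        set ps := tl.filterMap (fun p => if p.2 ≠ '-' ∧ p.2 ≠ '.' then some (p.1 + 1) else none)
        have h2 : ¬ ((s + 1 : Int) < pos ∧ pos ≤ s + 1 + (ps.length : Int)) := by omega
        have h3 : (s < pos ∧ pos ≤ s + (((hd.1 + 1) :: ps).length : Nat)) := by
          simp only [List.length_cons]; push_cast; omega
        rw [if_neg h2, if_pos h3]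
        have h4 : (pos - s - 1).toNat = 0 := by omega
        simp only [h4, List.getD, List.getElem?_cons_zero, List.length_cons]
        simp only [Prod.mk.injEq, Option.getD_some, and_true]
        push_cast; omega
      · have h1 : pvStepA pos (s, a, f) hd = (s + 1, a, f) := by
          simp [pvStepA, hg, hp]
        rw [List.foldl_cons, h1, ih]
        simp only [List.filterMap_cons, if_pos hg]
        set ps := tl.filterMap (fun p => if p.2 ≠ '-' ∧ p.2 ≠ '.' then some (p.1 + 1) else none)
        by_cases h2 : (s + 1 : Int) < pos ∧ pos ≤ s + 1 + (ps.length : Int)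
        · have h3 : s < pos ∧ pos ≤ s + (((hd.1 + 1) :: ps).length : Nat) := by
            simp only [List.length_cons]; push_cast; omega
          rw [if_pos h2, if_pos h3]
          have h4 : (pos - s - 1).toNat = (pos - (s + 1) - 1).toNat + 1 := by omega
          simp only [h4, List.getD, List.getElem?_cons_succ, List.length_cons]
          simp only [Prod.mk.injEq, and_true]
          push_cast; omega
        · have h3 : ¬ (s < pos ∧ pos ≤ s + (((hd.1 + 1) :: ps).length : Nat)) := by
            simp only [List.length_cons]; push_cast; omega
          rw [if_neg h2, if_neg h3]
          simp only [List.length_cons, Prod.mk.injEq, and_true]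
          push_cast; omega
    · have h1 : pvStepA pos (s, a, f) hd = (s, a, f) := by simp [pvStepA, hg]
      rw [List.foldl_cons, h1, ih]
      simp only [List.filterMap_cons, if_neg hg]

-- ===== VERDICT (by name: the statement is the Claim_ definition above) =====
theorem seq2alignPosition_spec : Claim_equal_seq2alignPosition := by
  intro sequence pos offset _
  unfold Spec_seq2alignPosition seq2alignPosition seq2alignPosition_alt
  set l := sequence.toList with hl
  set t := pos - (offset - 1) with ht
  simp only [pvFoldA_char, pvFoldB]
  have hlenpos : ((PySem.List.enumerate l).filterMap
      (fun p => if p.2 ≠ '-' ∧ p.2 ≠ '.' then some (p.1 + 1) else none)).length = pvCnt l := by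
    have := pvPositions_length l 0
    simpa [pvPositions] using this
  by_cases hg : 1 ≤ t ∧ t ≤ (pvCnt l : Int)
  · -- both take the "found" branch
    have hA : (0 : Int) < t ∧ t ≤ 0 + ((((PySem.List.enumerate l).filterMap
        (fun p => if p.2 ≠ '-' ∧ p.2 ≠ '.' then some (p.1 + 1) else none)).length : Nat) : Int) := by
      rw [hlenpos]; constructor <;> omega
    have hB : ¬ (t < 1 ∨ (0 : Int) + (pvCnt l : Int) < t) := by push_neg; constructor <;> omega
    simp only [if_pos hA, if_neg hB]
    -- A's value: the t-th position
    obtain ⟨c, hv, hc1, hc2, hc3, hc4⟩ := pvPositions_key l 0 t hg.1 hg.2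
    -- B's value: the binary-search result
    have hn1 : (1 : Int) ≤ (l.length : Int) := by omega
    obtain ⟨r, hr, hr1, hr2, hr3, hr4⟩ := pvBSearch_spec l t ((l.length : Int) - 1).toNat 1 (l.length : Int)
      (by omega) (le_refl _) hn1 (le_refl _)
      (by
        have : ((l.length : Int)).toNat = l.length := by omega
        rw [this, List.take_length]; omega)
      (by
        intro k hk
        have : k = 0 := by omega
        subst this; simp [pvCnt]; omega)
    rw [hr]
    -- uniqueness: r = c
    have hrc : r = (c : Int) := by
      by_contra hne
      rcases lt_or_gt_of_ne hne with hlt | hgt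
      · -- r < c : c's minimality says cnt(take r) ≤ t-1, but t ≤ cnt(take r)
        have hkr : r.toNat ≤ c - 1 := by omega
        have := pvCnt_take_mono l hkr
        omega
      · -- c < r : r's minimality at k = c gives cnt(take c) < t, but it equals t
        have := hr4 c (by omega)
        omega
    have hvz : ((PySem.List.enumerate l).filterMap
        (fun p => if p.2 ≠ '-' ∧ p.2 ≠ '.' then some (p.1 + 1) else none)).getD (t - 0 - 1).toNat 0 = (c : Int) := by
      have := hv
      simp only [pvPositions] at this
      simpa using this
    rw [hvz, hrc]
    simp
  · -- both return -1
    have hA : ¬ ((0 : Int) < t ∧ t ≤ 0 + ((((PySem.List.enumerate l).filterMap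
        (fun p => if p.2 ≠ '-' ∧ p.2 ≠ '.' then some (p.1 + 1) else none)).length : Nat) : Int)) := by
      rw [hlenpos]; push_neg at hg ⊢; intro h0; omega
    have hB : t < 1 ∨ (0 : Int) + (pvCnt l : Int) < t := by push_neg at hg; omega
    simp only [if_neg hA, if_pos hB]
    rfl
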